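-- pv_equiv track=rewrite | github.com/JackSun200312/ECP | src/scripts/trace/trace_doc.py | partition_by_namespace
-- ===== SOURCE A (Python) =====
-- from collections import defaultdict
--
-- PREFERRED_NAMESPACES = [
--     "Nat", "Int", "Rat", "Real", "Complex", "ENat", "NNReal", "EReal", "Monoid",
--     "CommMonoid", "Group", "CommGroup", "Ring", "CommRing", "Field", "Algebra",
--     "Module", "Set", "Finset", "Fintype", "Multiset", "List", "Fin", "BigOperators",
--     "Filter", "Polynomial", "SimpleGraph.Walk", "Equiv", "Embedding", "Injective",
--     "Surjective", "Bijective", "Order", "Topology"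
-- ]
--
-- def split_namespace(full_name):
--     parts = full_name.split(".")
--     definition_name = parts[-1]
--     namespace = ".".join(parts[:-1])
--     return namespace, definition_name
--
-- def partition_by_namespace(theorem_dict, filter_to_preferred=False):
--     ns_dict = defaultdict(dict)
--
--     for full_name, definition in theorem_dict.items():
--         ns, _ = split_namespace(full_name)
--         if filter_to_preferred and not any(
--             ns == pref or ns.startswith(pref + ".") for pref in PREFERRED_NAMESPACES
--         ):
--             continue
--         ns_dict[ns][full_name] = definition
--     return dict(ns_dict)
-- ===== SOURCE B (Python) =====
-- PREFERRED_NAMESPACES = [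
--     "Nat", "Int", "Rat", "Real", "Complex", "ENat", "NNReal", "EReal", "Monoid",
--     "CommMonoid", "Group", "CommGroup", "Ring", "CommRing", "Field", "Algebra",
--     "Module", "Set", "Finset", "Fintype", "Multiset", "List", "Fin", "BigOperators",
--     "Filter", "Polynomial", "SimpleGraph.Walk", "Equiv", "Embedding", "Injective",
--     "Surjective", "Bijective", "Order", "Topology"
-- ]
--
-- PREFERRED_SET = set(PREFERRED_NAMESPACES)
--
--
-- def prefix_in_preferred(head):
--     # head: the namespace's dot-separated components; test the namespace and
--     # each of its dot-boundary ancestor prefixes against the preferred set.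
--     return any(
--         ".".join(head[:i]) in PREFERRED_SET for i in range(1, len(head) + 1)
--     )
--
--
-- def partition_by_namespace(theorem_dict, filter_to_preferred=False):
--     ns_dict = {}
--     for full_name, definition in theorem_dict.items():
--         head = full_name.split(".")[:-1]
--         if filter_to_preferred and not prefix_in_preferred(head):
--             continue
--         ns = ".".join(head)
--         ns_dict.setdefault(ns, {})[full_name] = definition
--     return ns_dict
-- ===== Notes on version B (the rewrite author's own statement) =====
-- stated objective: alternative
-- what changed: Instead of scanning the 34-entry preferred-namespace list with '==' and startswith for every entry, B walks the namespace's own dot-boundary prefixes (built from the already-split components) and tests each against a set built once; grouping uses a plain dict with setdefault instead of defaultdict.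
import Mathlib
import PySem

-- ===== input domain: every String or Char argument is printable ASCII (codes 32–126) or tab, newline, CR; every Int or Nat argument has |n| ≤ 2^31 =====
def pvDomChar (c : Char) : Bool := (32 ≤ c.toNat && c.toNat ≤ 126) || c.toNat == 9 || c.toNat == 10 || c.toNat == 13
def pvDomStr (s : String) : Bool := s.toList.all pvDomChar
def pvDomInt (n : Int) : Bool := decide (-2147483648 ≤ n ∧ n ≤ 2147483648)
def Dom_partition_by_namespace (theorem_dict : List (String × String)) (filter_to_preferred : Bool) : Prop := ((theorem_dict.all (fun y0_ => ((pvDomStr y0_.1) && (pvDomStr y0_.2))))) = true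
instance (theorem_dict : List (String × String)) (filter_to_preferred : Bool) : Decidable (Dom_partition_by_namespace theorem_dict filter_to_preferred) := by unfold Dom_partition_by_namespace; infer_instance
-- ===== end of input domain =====

-- B filters by walking the namespace's own dot-boundary prefixes against a set built once
-- (instead of scanning the 34-entry preferred list with ==/startswith per entry) and groups
-- in a separate second pass over the kept entries: an alternative decomposition, not claimed faster.


def pvPreferredNamespaces : List String := [
  "Nat", "Int", "Rat", "Real", "Complex", "ENat", "NNReal", "EReal", "Monoid",
  "CommMonoid", "Group", "CommGroup", "Ring", "CommRing", "Field", "Algebra",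
  "Module", "Set", "Finset", "Fintype", "Multiset", "List", "Fin", "BigOperators",
  "Filter", "Polynomial", "SimpleGraph.Walk", "Equiv", "Embedding", "Injective",
  "Surjective", "Bijective", "Order", "Topology"]

-- ===== PORT A =====
-- helper split_namespace: '.' is a nonempty literal so split? is always `some`,
-- and a split result is never empty, so both `getD` defaults are unreachable.
def split_namespace (full_name : String) : String × String :=
  let parts := (PySem.Str.split? full_name ".").getD []
  let definition_name := (PySem.List.pyGet? parts (-1)).getD ""
  let namespc := PySem.Str.join "." (PySem.List.slice parts none (some (-1)))
  (namespc, definition_name)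

def partition_by_namespace (theorem_dict : List (String × String)) (filter_to_preferred : Bool) : List (String × List (String × String)) :=
  let ns_dict := theorem_dict.foldl
    (fun (d : PySem.Dict String (PySem.Dict String String)) kv =>
      let ns := (split_namespace kv.1).1
      if filter_to_preferred &&
          !(pvPreferredNamespaces.any (fun pref => ns == pref || PySem.Str.startswith ns (pref ++ "."))) then
        d  -- continue
      else
        -- defaultdict: ns_dict[ns][full_name] = definition
        PySem.Dict.modify d ns PySem.Dict.empty (fun inner => PySem.Dict.insert inner kv.1 kv.2))
    PySem.Dict.empty
  (PySem.Dict.items ns_dict).map (fun kv => (kv.1, PySem.Dict.items kv.2))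

-- ===== PORT B =====
def pvPreferredSet : PySem.Set String := PySem.Set.ofList pvPreferredNamespaces

def prefix_in_preferred (head : List String) : Bool :=
  (PySem.List.pyRange 1 ((head.length : Int) + 1) 1).any (fun i =>
    PySem.Set.contains pvPreferredSet (PySem.Str.join "." (PySem.List.slice head none (some i))))

def partition_by_namespace_alt (theorem_dict : List (String × String)) (filter_to_preferred : Bool) : List (String × List (String × String)) :=
  -- pass 1: the comprehension building kept = [(ns, full_name, definition), …]
  let kept := (theorem_dict.filter (fun kv =>
      !filter_to_preferred ||
        prefix_in_preferred (PySem.List.slice ((PySem.Str.split? kv.1 ".").getD []) none (some (-1))))).map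
    (fun kv =>
      (PySem.Str.join "." (PySem.List.slice ((PySem.Str.split? kv.1 ".").getD []) none (some (-1))), kv.1, kv.2))
  -- pass 2: ns_dict.setdefault(ns, {})[full_name] = definition, i.e. d[ns] = d.get(ns, {}) ∪ {fn: defn}
  let ns_dict := kept.foldl
    (fun (d : PySem.Dict String (PySem.Dict String String)) t =>
      PySem.Dict.modify d t.1 PySem.Dict.empty (fun m => PySem.Dict.insert m t.2.1 t.2.2))
    PySem.Dict.empty
  (PySem.Dict.items ns_dict).map (fun kv => (kv.1, PySem.Dict.items kv.2))

-- ===== PRECONDITION & SPEC =====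
def Spec_partition_by_namespace (theorem_dict : List (String × String)) (filter_to_preferred : Bool) (out : List (String × List (String × String))) : Prop := out = partition_by_namespace_alt theorem_dict filter_to_preferred
instance (theorem_dict : List (String × String)) (filter_to_preferred : Bool) (out : List (String × List (String × String))) : Decidable (Spec_partition_by_namespace theorem_dict filter_to_preferred out) := by unfold Spec_partition_by_namespace; infer_instance

-- ===== CLAIM (what is proved, stated in full; the proofs are below) =====
def Claim_equal_partition_by_namespace : Prop := ∀ (theorem_dict : List (String × String)) (filter_to_preferred : Bool), Dom_partition_by_namespace theorem_dict filter_to_preferred → Spec_partition_by_namespace theorem_dict filter_to_preferred (partition_by_namespace theorem_dict filter_to_preferred)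

-- ===== LEMMAS AND PROOFS =====
theorem pv_go_eq (c : Char) (fuel : Nat) : ∀ (l cur : List Char) (acc : List (List Char)) (_ : l.length < fuel),
    PySem.Chars.splitOn.go [c] fuel l cur acc
      = acc.reverse ++ (List.splitOnP (fun x => x == c) l).modifyHead (cur.reverse ++ ·) := by
  induction fuel with
  | zero => intro l cur acc h; omega
  | succ fuel ih =>
    intro l cur acc h
    cases l with
    | nil => simp [PySem.Chars.splitOn.go, List.splitOnP_nil]
    | cons x rest =>
      rw [PySem.Chars.splitOn.go]
      by_cases hx : x = c
      · subst hx
        rw [if_pos (by simp [List.isPrefixOf])]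
        have hr : List.drop [x].length (x :: rest) = rest := by simp
        rw [hr, ih rest [] _ (by simpa using Nat.lt_of_succ_lt_succ h)]
        rw [List.splitOnP_cons]
        simp only [BEq.rfl, if_true]
        rcases hs : List.splitOnP (fun y => y == x) rest with _ | ⟨a, t⟩
        · exact absurd hs (List.splitOnP_ne_nil _ _)
        · simp
      · have hbx : (x == c) = false := by simp [hx]
        rw [if_neg (by simp [List.isPrefixOf]; exact fun hcx => hx hcx.symm)]
        rw [ih rest (x :: cur) acc (by simpa using Nat.lt_of_succ_lt_succ h)]
        rw [List.splitOnP_cons, hbx]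
        simp only [Bool.false_eq_true, if_false]
        rcases hs : List.splitOnP (fun y => y == c) rest with _ | ⟨a, t⟩
        · exact absurd hs (List.splitOnP_ne_nil _ _)
        · simp

theorem pv_not_mem_of_mem_splitOn {c : Char} {s u : List Char} (h : u ∈ List.splitOn c s) : c ∉ u := by
  unfold List.splitOn at h
  induction s generalizing u with
  | nil => simp [List.splitOnP_nil] at h; simp [h]
  | cons x rest ih =>
    rw [List.splitOnP_cons] at h
    by_cases hx : (x == c) = true
    · rw [if_pos hx] at h
      rcases List.mem_cons.mp h with h | h
      · simp [h]
      · exact ih h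
    · rw [if_neg hx] at h
      rcases hs : List.splitOnP (fun y => y == c) rest with _ | ⟨a, t⟩
      · exact absurd hs (List.splitOnP_ne_nil _ _)
      · rw [hs] at h
        simp only [List.modifyHead] at h
        rcases List.mem_cons.mp h with h | h
        · subst h
          intro hmem
          rcases List.mem_cons.mp hmem with h1 | h1
          · exact hx (by simp [h1.symm])
          · exact ih (by rw [hs]; exact List.mem_cons_self ..) h1
        · exact ih (by rw [hs]; exact List.mem_cons_of_mem _ h)

theorem pv_join_cons_ne (c : Char) (u : List Char) (X : List (List Char)) (hX : X ≠ []) :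
    PySem.Chars.join [c] (u :: X) = u ++ c :: PySem.Chars.join [c] X := by
  rcases X with _ | ⟨a, t⟩
  · exact absurd rfl hX
  · rw [PySem.Chars.join_cons_cons]; simp

theorem pv_join_take_drop (c : Char) : ∀ (H : List (List Char)) (i : Nat),
    1 ≤ i → i < H.length →
    PySem.Chars.join [c] H
      = PySem.Chars.join [c] (H.take i) ++ c :: PySem.Chars.join [c] (H.drop i) := by
  intro H
  induction H with
  | nil => intro i h1 h2; simp at h2
  | cons u H' ih =>
    intro i h1 h2
    have hne : H' ≠ [] := by
      intro hnil; rw [hnil] at h2; simp at h2; omega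
    obtain ⟨j, rfl⟩ : ∃ j, i = j + 1 := ⟨i - 1, by omega⟩
    cases j with
    | zero =>
      simp only [List.take_succ_cons, List.take_zero, List.drop_succ_cons, List.drop_zero]
      rw [PySem.Chars.join_singleton, pv_join_cons_ne c u H' hne]
    | succ j =>
      have hlt : j + 1 < H'.length := by simp at h2; omega
      have htne : H'.take (j+1) ≠ [] := by
        intro hnil
        rcases List.take_eq_nil_iff.mp hnil with h | h
        · omega
        · exact hne h
      simp only [List.take_succ_cons, List.drop_succ_cons]
      rw [pv_join_cons_ne c u H' hne, pv_join_cons_ne c u _ htne,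
        ih (j+1) (by omega) hlt]
      simp

theorem pv_splitOn_eq (c : Char) (s : List Char) :
    PySem.Chars.splitOn s [c] = List.splitOn c s := by
  unfold PySem.Chars.splitOn List.splitOn
  rw [pv_go_eq c (s.length + 1) s [] [] (by omega)]
  rcases hs : List.splitOnP (fun y => y == c) s with _ | ⟨a, t⟩
  · exact absurd hs (List.splitOnP_ne_nil _ _)
  · simp

theorem pv_splitOn_ne_nil (c : Char) (s : List Char) : List.splitOn c s ≠ [] := by
  unfold List.splitOn; exact List.splitOnP_ne_nil _ _

theorem pv_main (c : Char) (H : List (List Char)) (p : List Char)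
    (hnd : ∀ u ∈ H, c ∉ u) (hp : p ≠ []) :
    (PySem.Chars.join [c] H = p ∨ (p ++ [c]) <+: PySem.Chars.join [c] H)
      ↔ ∃ i : Nat, 1 ≤ i ∧ i ≤ H.length ∧ PySem.Chars.join [c] (H.take i) = p := by
  have hjoin : ∀ L : List (List Char), PySem.Chars.join [c] L = [c].intercalate L := fun _ => rfl
  constructor
  · rintro (heq | ⟨t, ht⟩)
    · have hHne : H ≠ [] := by
        intro hnil; rw [hnil, PySem.Chars.join_nil] at heq; exact hp heq.symm
      exact ⟨H.length, by
        rcases H with _ | ⟨a, s⟩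
        · exact absurd rfl hHne
        · simp, le_refl _, by rw [List.take_of_length_le (le_refl _)]; exact heq⟩
    · -- join H = p ++ c :: t
      have ht' : PySem.Chars.join [c] H = p ++ c :: t := by
        rw [← ht]; simp
      have hHne : H ≠ [] := by
        intro hnil; rw [hnil, PySem.Chars.join_nil] at ht'
        exact absurd ht'.symm (by simp [hp])
      have hsplit : List.splitOn c (PySem.Chars.join [c] H) = H := by
        rw [hjoin]; exact List.splitOn_intercalate H c hnd hHne
      have hsplit2 : List.splitOn c (p ++ c :: t) = List.splitOn c p ++ List.splitOn c t := by
        unfold List.splitOn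
        exact List.splitOnP_append_cons _ p t c (by simp)
      have hH : H = List.splitOn c p ++ List.splitOn c t := by
        rw [← hsplit, ht', hsplit2]
      have hplen : 1 ≤ (List.splitOn c p).length := by
        rcases h : List.splitOn c p with _ | ⟨a, s⟩
        · exact absurd h (pv_splitOn_ne_nil c p)
        · simp
      refine ⟨(List.splitOn c p).length, hplen, ?_, ?_⟩
      · rw [hH]; simp
      · rw [hH, List.take_left, hjoin, List.intercalate_splitOn]
  · rintro ⟨i, h1, h2, h3⟩
    rcases Nat.lt_or_ge i H.length with hlt | hge
    · right
      rw [pv_join_take_drop c H i h1 hlt, h3]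
      exact ⟨PySem.Chars.join [c] (H.drop i), by simp⟩
    · left
      rw [List.take_of_length_le hge] at h3
      exact h3

theorem pv_pref_ne_nil : ∀ pref ∈ pvPreferredNamespaces, pref.toList ≠ [] := by decide

theorem pv_join_toList (head : List String) :
    (PySem.Str.join "." head).toList = PySem.Chars.join ['.'] (head.map String.toList) := by
  simp [PySem.Str.join, String.toList_ofList]

theorem pv_filter_eq (head : List String) (hnd : ∀ u ∈ head, '.' ∉ u.toList) :
    pvPreferredNamespaces.any (fun pref =>
        PySem.Str.join "." head == pref || PySem.Str.startswith (PySem.Str.join "." head) (pref ++ "."))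
      = prefix_in_preferred head := by
  rw [Bool.eq_iff_iff]
  set H : List (List Char) := head.map String.toList with hH
  have hnd' : ∀ v ∈ H, '.' ∉ v := by
    intro v hv
    rcases List.mem_map.mp hv with ⟨u, hu, rfl⟩
    exact hnd u hu
  constructor
  · intro h
    rcases List.any_eq_true.mp h with ⟨pref, hpref, hcond⟩
    have hcond' : PySem.Chars.join ['.'] H = pref.toList
        ∨ (pref.toList ++ ['.']) <+: PySem.Chars.join ['.'] H := by
      rcases Bool.or_eq_true_iff.mp hcond with h1 | h1
      · left; rw [← pv_join_toList]; rw [← String.toList_inj.mpr (beq_iff_eq.mp h1)]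
      · right
        rw [PySem.Str.startswith] at h1
        have := (PySem.Chars.startswith_iff _ _).mp h1
        rw [String.toList_append] at this
        rw [← pv_join_toList]
        simpa using this
    rcases (pv_main '.' H pref.toList hnd' (pv_pref_ne_nil pref hpref)).mp hcond' with ⟨i, h1, h2, h3⟩
    apply List.any_eq_true.mpr
    refine ⟨(i : Int), ?_, ?_⟩
    · rw [PySem.List.mem_pyRange_one]
      constructor
      · exact_mod_cast h1
      · have : H.length = head.length := by simp [hH]
        omega
    · rw [PySem.List.slice_to head (by positivity)]
      apply (PySem.Set.contains_iff _ _).mpr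
      apply (PySem.Set.mem_ofList _ _).mpr
      have : PySem.Str.join "." (head.take i) = pref := by
        apply String.toList_inj.mp
        rw [pv_join_toList, List.map_take, ← hH, h3]
      simp only [Int.toNat_natCast, this]
      exact hpref
  · intro h
    rcases List.any_eq_true.mp h with ⟨x, hx, hcond⟩
    rw [PySem.List.mem_pyRange_one] at hx
    have hx0 : 0 ≤ x := by omega
    rw [PySem.List.slice_to head hx0] at hcond
    have hmem : PySem.Str.join "." (head.take x.toNat) ∈ pvPreferredNamespaces :=
      (PySem.Set.mem_ofList _ _).mp ((PySem.Set.contains_iff _ _).mp hcond)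
    set pref := PySem.Str.join "." (head.take x.toNat) with hprefdef
    have h3 : PySem.Chars.join ['.'] (H.take x.toNat) = pref.toList := by
      rw [hprefdef, pv_join_toList, List.map_take]
    have hcond' := (pv_main '.' H pref.toList hnd' (pv_pref_ne_nil pref hmem)).mpr
      ⟨x.toNat, by omega, by simp [hH]; omega, h3⟩
    apply List.any_eq_true.mpr
    refine ⟨pref, hmem, ?_⟩
    apply Bool.or_eq_true_iff.mpr
    rcases hcond' with h1 | h1
    · left
      apply beq_iff_eq.mpr
      apply String.toList_inj.mp
      rw [pv_join_toList, h1]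
    · right
      rw [PySem.Str.startswith]
      apply (PySem.Chars.startswith_iff _ _).mpr
      have hdot : (".":String).toList = ['.'] := rfl
      have hjH : (PySem.Str.join "." head).toList = PySem.Chars.join ['.'] H := by
        rw [pv_join_toList, ← hH]
      rw [String.toList_append, hdot, hjH]
      exact h1

theorem pv_parts_eq (fn : String) :
    (PySem.Str.split? fn ".").getD []
      = (PySem.Chars.splitOn fn.toList ['.']).map String.ofList := by
  simp [PySem.Str.split?, PySem.Chars.split?]

theorem pv_head_nodot (fn : String) :
    ∀ u ∈ PySem.List.slice ((PySem.Str.split? fn ".").getD []) none (some (-1)), '.' ∉ u.toList := by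
  intro u hu
  rw [PySem.List.slice_to_neg_one, pv_parts_eq] at hu
  rw [← List.map_dropLast] at hu
  rcases List.mem_map.mp hu with ⟨v, hv, rfl⟩
  rw [String.toList_ofList]
  have hv' : v ∈ PySem.Chars.splitOn fn.toList ['.'] := (List.dropLast_sublist _).subset hv
  rw [pv_splitOn_eq] at hv'
  exact pv_not_mem_of_mem_splitOn hv'

theorem pv_final (td : List (String × String)) (f : Bool) :
    partition_by_namespace td f = partition_by_namespace_alt td f := by
  unfold partition_by_namespace partition_by_namespace_alt
  dsimp only
  congr 1
  rw [List.foldl_map]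
  have hstep : (fun (d : PySem.Dict String (PySem.Dict String String)) (kv : String × String) =>
      let ns := (split_namespace kv.1).1
      if f && !(pvPreferredNamespaces.any (fun pref => ns == pref || PySem.Str.startswith ns (pref ++ "."))) then d
      else PySem.Dict.modify d ns PySem.Dict.empty (fun inner => PySem.Dict.insert inner kv.1 kv.2))
      = (fun d kv =>
        if !f || prefix_in_preferred (PySem.List.slice ((PySem.Str.split? kv.1 ".").getD []) none (some (-1))) then
          PySem.Dict.modify d ((split_namespace kv.1).1) PySem.Dict.empty (fun inner => PySem.Dict.insert inner kv.1 kv.2)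
        else d) := by
    funext d kv
    simp only [split_namespace]
    rw [pv_filter_eq _ (pv_head_nodot kv.1)]
    rcases f with _ | _ <;> rcases h : prefix_in_preferred (PySem.List.slice ((PySem.Str.split? kv.1 ".").getD []) none (some (-1))) with _ | _ <;> simp
  rw [hstep]
  rw [PySem.List.foldl_if_eq_foldl_filter
    (fun kv => !f || prefix_in_preferred (PySem.List.slice ((PySem.Str.split? kv.1 ".").getD []) none (some (-1))))
    (fun d kv => PySem.Dict.modify d ((split_namespace kv.1).1) PySem.Dict.empty (fun inner => PySem.Dict.insert inner kv.1 kv.2)) td PySem.Dict.empty]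
  simp only [split_namespace]

-- ===== VERDICT (by name: the statement is the Claim_ definition above) =====
theorem partition_by_namespace_spec : Claim_equal_partition_by_namespace := by
  intro td f _
  unfold Spec_partition_by_namespace
  exact pv_final td f
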